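-- pv_equiv track=rewrite | github.com/krisztinahorvath/UBB-Computer-Science | Semester 5/Cryptography/Lab4/rsa.py | blocks_to_numbers
-- ===== SOURCE A (Python) =====
-- def blocks_to_numbers(letters):
--     num = 0
--
--     for letter in letters:
--         uppercase_letter = letter.upper()
--
--         if uppercase_letter == '_':
--             num = num * 27
--         else:
--             num = num * 27 + (ord(uppercase_letter) - ord('A') + 1)
--
--     return num
-- ===== SOURCE B (Python) =====
-- def blocks_to_numbers(letters):
--     digits = []
--     for letter in letters:
--         u = letter.upper()
--         digits.append(0 if u == '_' else ord(u) - ord('A') + 1)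
--     total = 0
--     power = 1
--     for d in reversed(digits):
--         total += d * power
--         power *= 27
--     return total
-- ===== Notes on version B (the rewrite author's own statement) =====
-- stated objective: alternative
-- what changed: Replaced the single front-to-back Horner-accumulator loop over the characters with two passes: first build the list of base-27 digit values, then sum them back-to-front with an explicitly maintained positional power of 27.
import Mathlib
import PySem

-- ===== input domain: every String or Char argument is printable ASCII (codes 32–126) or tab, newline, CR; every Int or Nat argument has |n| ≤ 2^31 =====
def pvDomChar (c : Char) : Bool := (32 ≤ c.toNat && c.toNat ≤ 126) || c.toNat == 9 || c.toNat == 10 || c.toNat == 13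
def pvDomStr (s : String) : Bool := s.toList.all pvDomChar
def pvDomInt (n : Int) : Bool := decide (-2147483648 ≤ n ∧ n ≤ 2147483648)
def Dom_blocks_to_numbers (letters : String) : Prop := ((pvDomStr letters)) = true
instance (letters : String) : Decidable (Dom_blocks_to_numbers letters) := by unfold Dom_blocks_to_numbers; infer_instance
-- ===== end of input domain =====

-- B replaces A's single front-to-back Horner loop by two passes: build the base-27 digit list,
-- then sum it back-to-front with an explicitly maintained positional power of 27. Same O(n) value.

-- ===== PORT A =====
def blocks_to_numbers (letters : String) : Int :=
  letters.toList.foldl (fun num letter =>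
    let uppercase_letter := PySem.Chars.upperChar letter
    if uppercase_letter = '_' then num * 27
    else num * 27 + ((uppercase_letter.toNat : Int) - 65 + 1)) 0

-- ===== PORT B =====
def blocks_to_numbers_alt (letters : String) : Int :=
  let digits := letters.toList.map (fun letter =>
    let u := PySem.Chars.upperChar letter
    if u = '_' then (0 : Int) else (u.toNat : Int) - 65 + 1)
  (digits.reverse.foldl (fun (s : Int × Int) d => (s.1 + d * s.2, s.2 * 27)) (0, 1)).1

-- ===== PRECONDITION & SPEC =====
def Spec_blocks_to_numbers (letters : String) (out : Int) : Prop := out = blocks_to_numbers_alt letters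
instance (letters : String) (out : Int) : Decidable (Spec_blocks_to_numbers letters out) := by unfold Spec_blocks_to_numbers; infer_instance

-- ===== CLAIM (what is proved, stated in full; the proofs are below) =====
def Claim_equal_blocks_to_numbers : Prop := ∀ (letters : String), Dom_blocks_to_numbers letters → Spec_blocks_to_numbers letters (blocks_to_numbers letters)

-- ===== LEMMAS AND PROOFS =====

def pvDigit (c : Char) : Int :=
  let u := PySem.Chars.upperChar c
  if u = '_' then (0 : Int) else (u.toNat : Int) - 65 + 1

-- A's loop body equals 'num*27 + digit'
theorem pvA_fold_eq_digits (cs : List Char) (num : Int) :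
    cs.foldl (fun num letter =>
      let uppercase_letter := PySem.Chars.upperChar letter
      if uppercase_letter = '_' then num * 27
      else num * 27 + ((uppercase_letter.toNat : Int) - 65 + 1)) num
    = (cs.map pvDigit).foldl (fun a d => a * 27 + d) num := by
  induction cs generalizing num with
  | nil => rfl
  | cons c cs ih =>
      simp only [List.foldl_cons, List.map_cons, pvDigit]
      rw [ih]
      congr 1
      by_cases h : PySem.Chars.upperChar c = '_' <;> simp [h]

-- the reversed running-power fold, with general accumulator, equals Horner
theorem pvRev_fold (ds : List Int) :
    ∀ t p : Int,
      ds.reverse.foldl (fun (s : Int × Int) d => (s.1 + d * s.2, s.2 * 27)) (t, p)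
      = (t + p * ds.foldl (fun a d => a * 27 + d) 0, p * 27 ^ ds.length) := by
  induction ds using List.reverseRecOn with
  | nil => intro t p; simp
  | append_singleton ds d ih =>
      intro t p
      rw [List.reverse_append]
      simp only [List.reverse_cons, List.reverse_nil, List.nil_append, List.foldl_cons,
        List.foldl_append, List.foldl_nil, List.length_append, List.length_cons, List.length_nil]
      rw [ih (t + d * p) (p * 27)]
      refine Prod.ext ?_ ?_ <;> simp <;> ring

-- ===== VERDICT (by name: the statement is the Claim_ definition above) =====
theorem blocks_to_numbers_spec : Claim_equal_blocks_to_numbers := by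
  intro letters _
  unfold Spec_blocks_to_numbers blocks_to_numbers blocks_to_numbers_alt
  rw [pvA_fold_eq_digits]
  show _ = (((letters.toList.map pvDigit).reverse.foldl
      (fun (s : Int × Int) d => (s.1 + d * s.2, s.2 * 27)) (0, 1))).1
  rw [pvRev_fold]
  simp
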